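-- pv_equiv track=rewrite | github.com/khalilkafrouni/DB-explorer | app.py | generate_fk_pk_matches
-- ===== SOURCE A (Python) =====
-- def generate_fk_pk_matches(primary_keys, foreign_keys):
--     """Generate all possible matches between foreign keys and primary keys"""
--     matches = []
--     primary_key_dict = {}
--
--     # Group primary keys by field name for faster lookup
--     for table, field in primary_keys:
--         # Strip '_id' suffix if present for matching
--         base_field = field.lower().replace('_id', '')
--         primary_key_dict[base_field] = primary_key_dict.get(base_field, []) + [(table, field)]
--
--     for fk_table, fk_field in foreign_keys:
--         # Strip '_id' suffix for matching
--         base_fk = fk_field.lower().replace('_id', '')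
--
--         # Look for matching primary keys
--         if base_fk in primary_key_dict:
--             for pk_table, pk_field in primary_key_dict[base_fk]:
--                 if pk_table != fk_table:  # Avoid self-references
--                     matches.append({
--                         'table_pk': pk_table,
--                         'field_pk': pk_field,
--                         'table_fk': fk_table,
--                         'field_fk': fk_field
--                     })
--
--     return matches
-- ===== SOURCE B (Python) =====
-- def generate_fk_pk_matches(primary_keys, foreign_keys):
--     """Generate all possible matches between foreign keys and primary keys"""
--     def base(field):
--         return field.lower().replace('_id', '')
--     return [
--         {'table_pk': pk_table, 'field_pk': pk_field,
--          'table_fk': fk_table, 'field_fk': fk_field}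
--         for fk_table, fk_field in foreign_keys
--         for pk_table, pk_field in primary_keys
--         if pk_table != fk_table and base(pk_field) == base(fk_field)
--     ]
-- ===== Notes on version B (the rewrite author's own statement) =====
-- stated objective: simpler
-- what changed: Replaced the grouping dict plus two-phase lookup loop with a single flat nested-loop comprehension that scans primary_keys directly for each foreign key.
import Mathlib
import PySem

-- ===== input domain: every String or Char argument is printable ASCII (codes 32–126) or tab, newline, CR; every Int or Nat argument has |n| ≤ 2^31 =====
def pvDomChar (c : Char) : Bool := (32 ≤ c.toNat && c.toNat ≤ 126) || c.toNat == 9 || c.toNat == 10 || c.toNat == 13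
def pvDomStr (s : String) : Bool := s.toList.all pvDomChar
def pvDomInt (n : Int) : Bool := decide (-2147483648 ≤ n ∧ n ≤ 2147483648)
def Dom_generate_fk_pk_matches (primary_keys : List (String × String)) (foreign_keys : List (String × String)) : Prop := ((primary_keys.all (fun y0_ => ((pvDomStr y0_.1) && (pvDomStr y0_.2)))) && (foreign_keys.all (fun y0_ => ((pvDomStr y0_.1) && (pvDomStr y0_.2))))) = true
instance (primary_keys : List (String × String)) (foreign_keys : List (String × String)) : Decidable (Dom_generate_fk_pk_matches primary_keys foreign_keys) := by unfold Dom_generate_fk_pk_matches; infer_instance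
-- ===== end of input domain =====

-- ===== PORT A =====
-- B replaces A's grouping dict + lookup with one flat nested-loop comprehension (simpler; return value only, no mutation).
def pvBase (field : String) : String :=
  PySem.Str.replace (PySem.Str.lower field) "_id" ""

def generate_fk_pk_matches (primary_keys : List (String × String)) (foreign_keys : List (String × String)) : List (List (String × String)) :=
  let primary_key_dict : PySem.Dict String (List (String × String)) :=
    primary_keys.foldl
      (fun d p => d.insert (pvBase p.2) (d.getD (pvBase p.2) [] ++ [p]))
      PySem.Dict.empty
  foreign_keys.foldl
    (fun acc fk =>
      let base_fk := pvBase fk.2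
      if primary_key_dict.contains base_fk then
        (primary_key_dict.getD base_fk []).foldl
          (fun m p =>
            if p.1 != fk.1 then
              m ++ [[("table_pk", p.1), ("field_pk", p.2), ("table_fk", fk.1), ("field_fk", fk.2)]]
            else m)
          acc
      else acc)
    []

-- ===== PORT B =====
def generate_fk_pk_matches_alt (primary_keys : List (String × String)) (foreign_keys : List (String × String)) : List (List (String × String)) :=
  foreign_keys.flatMap (fun fk =>
    (primary_keys.filter (fun p => p.1 != fk.1 && pvBase p.2 == pvBase fk.2)).map
      (fun p => [("table_pk", p.1), ("field_pk", p.2), ("table_fk", fk.1), ("field_fk", fk.2)]))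

-- ===== PRECONDITION & SPEC =====
def Spec_generate_fk_pk_matches (primary_keys : List (String × String)) (foreign_keys : List (String × String)) (out : List (List (String × String))) : Prop := out = generate_fk_pk_matches_alt primary_keys foreign_keys
instance (primary_keys : List (String × String)) (foreign_keys : List (String × String)) (out : List (List (String × String))) : Decidable (Spec_generate_fk_pk_matches primary_keys foreign_keys out) := by unfold Spec_generate_fk_pk_matches; infer_instance

-- ===== CLAIM (what is proved, stated in full; the proofs are below) =====
def Claim_equal_generate_fk_pk_matches : Prop := ∀ (primary_keys : List (String × String)) (foreign_keys : List (String × String)), Dom_generate_fk_pk_matches primary_keys foreign_keys → Spec_generate_fk_pk_matches primary_keys foreign_keys (generate_fk_pk_matches primary_keys foreign_keys)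

-- ===== LEMMAS AND PROOFS =====

theorem pv_getD_build (l : List (String × String)) (d : PySem.Dict String (List (String × String))) (c : String) :
    (l.foldl (fun d p => d.insert (pvBase p.2) (d.getD (pvBase p.2) [] ++ [p])) d).getD c []
      = d.getD c [] ++ l.filter (fun p => pvBase p.2 == c) := by
  induction l generalizing d with
  | nil => simp
  | cons p l ih =>
    simp only [List.foldl_cons, List.filter_cons, ih, PySem.Dict.getD_insert]
    by_cases h : c = pvBase p.2
    · simp [h, List.append_assoc]
    · have h2 : (pvBase p.2 == c) = false := by simp [Ne.symm h]
      simp [h, h2]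

theorem pv_contains_build (l : List (String × String)) (d : PySem.Dict String (List (String × String))) (c : String) :
    (l.foldl (fun d p => d.insert (pvBase p.2) (d.getD (pvBase p.2) [] ++ [p])) d).contains c
      = (d.contains c || l.any (fun p => pvBase p.2 == c)) := by
  induction l generalizing d with
  | nil => simp
  | cons p l ih =>
    simp only [List.foldl_cons, List.any_cons, ih, PySem.Dict.contains_insert]
    by_cases h : c = pvBase p.2
    · simp [h, Bool.or_comm]
    · have h1 : (c == pvBase p.2) = false := by simp [h]
      have h2 : (pvBase p.2 == c) = false := by simp [Ne.symm h]
      simp [h1, h2]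

theorem pv_step (pks : List (String × String)) (m : List (List (String × String))) (fk : String × String) :
    (let primary_key_dict := pks.foldl (fun d p => d.insert (pvBase p.2) (d.getD (pvBase p.2) [] ++ [p])) PySem.Dict.empty
     let base_fk := pvBase fk.2
     if primary_key_dict.contains base_fk then
        (primary_key_dict.getD base_fk []).foldl
          (fun m p =>
            if p.1 != fk.1 then
              m ++ [[("table_pk", p.1), ("field_pk", p.2), ("table_fk", fk.1), ("field_fk", fk.2)]]
            else m)
          m
     else m)
    = m ++ (pks.filter (fun p => p.1 != fk.1 && pvBase p.2 == pvBase fk.2)).map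
          (fun p => [("table_pk", p.1), ("field_pk", p.2), ("table_fk", fk.1), ("field_fk", fk.2)]) := by
  dsimp only
  rw [pv_contains_build, pv_getD_build]
  simp only [PySem.Dict.contains_empty, PySem.Dict.getD_empty, Bool.false_or, List.nil_append]
  by_cases h : (pks.any fun p => pvBase p.2 == pvBase fk.2) = true
  · simp only [h, if_true, PySem.List.foldl_append_if, List.filter_filter]
  · simp only [h, if_false, Bool.false_eq_true]
    have hnil : pks.filter (fun p => p.1 != fk.1 && pvBase p.2 == pvBase fk.2) = [] := by
      rw [List.filter_eq_nil_iff]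
      intro p hp hc
      have hc2 : (pvBase p.2 == pvBase fk.2) = true := by
        cases hb : (pvBase p.2 == pvBase fk.2) <;> simp [hb] at hc ⊢
      exact h (List.any_eq_true.mpr ⟨p, hp, hc2⟩)
    simp [hnil]

-- ===== VERDICT (by name: the statement is the Claim_ definition above) =====
theorem generate_fk_pk_matches_spec : Claim_equal_generate_fk_pk_matches := by
  intro pks fks _
  unfold Spec_generate_fk_pk_matches generate_fk_pk_matches generate_fk_pk_matches_alt
  rw [PySem.List.foldl_congr_mem (g := fun (m : List (List (String × String))) fk =>
        m ++ (pks.filter (fun p => p.1 != fk.1 && pvBase p.2 == pvBase fk.2)).map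
          (fun p => [("table_pk", p.1), ("field_pk", p.2), ("table_fk", fk.1), ("field_fk", fk.2)]))]
  · rw [PySem.List.foldl_append_eq_flatMap]; simp
  · intro m fk _
    exact pv_step pks m fk
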